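-- pv_equiv track=rewrite | github.com/thomsondana/Cryptography | rsa.py | convert_number_to_message
-- ===== SOURCE A (Python) =====
-- def convert_number_to_message(message):
--     # cast message to string
--     message = str(message)
--     # if the length is odd we need to add a leading zero
--     if len(message) % 2 != 0:
--         message = '0' + message
--
--     # define the conversion table
--     convert_table = {'A': '01', 'B': '02', 'C': '03', 'D': '04', 'E': '05', 'F': '06',
--                      'G': '07', 'H': '08', 'I': '09', 'J': '10', 'K': '11', 'L': '12',
--                      'M': '13', 'N': '14', 'O': '15', 'P': '16', 'Q': '17', 'R': '18',
--                      'S': '19', 'T': '20', 'U': '21', 'V': '22', 'W': '23', 'X': '24',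
--                      'Y': '25', 'Z': '26'}
--
--     # make list of keys and list of values
--     key_list = list(convert_table.keys())
--     val_list = list(convert_table.values())
--
--     # seperate message into 2 character chunks
--     n = 2
--     chunks = [message[i:i+n] for i in range(0, len(message), n)]
--
--     string_message = ''
--     # for each chunk find the index of the value and add the key at that index to the string
--     for val in chunks:
--         position = val_list.index(val)
--         string_message += key_list[position]
--
--     return string_message
-- ===== SOURCE B (Python) =====
-- def convert_number_to_message(message):
--     # Pure arithmetic: peel base-100 digits off the number, low to high,
--     # map each digit d in 1..26 to chr(64+d), then reverse. No string
--     # conversion and no conversion table.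
--     letters = []
--     n = message
--     while n > 0:
--         n, d = divmod(n, 100)
--         if not 1 <= d <= 26:
--             raise ValueError(f"{d} is not in list")
--         letters.append(chr(64 + d))
--     return ''.join(reversed(letters))
-- ===== Notes on version B (the rewrite author's own statement) =====
-- stated objective: simpler
-- what changed: B drops the str-cast, zero-padding, 2-char chunking, dict key/value lists and the O(26) val_list.index scan per chunk, and instead peels base-100 digits off the number with divmod, mapping each digit d in 1..26 to chr(64+d).
import Mathlib
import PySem

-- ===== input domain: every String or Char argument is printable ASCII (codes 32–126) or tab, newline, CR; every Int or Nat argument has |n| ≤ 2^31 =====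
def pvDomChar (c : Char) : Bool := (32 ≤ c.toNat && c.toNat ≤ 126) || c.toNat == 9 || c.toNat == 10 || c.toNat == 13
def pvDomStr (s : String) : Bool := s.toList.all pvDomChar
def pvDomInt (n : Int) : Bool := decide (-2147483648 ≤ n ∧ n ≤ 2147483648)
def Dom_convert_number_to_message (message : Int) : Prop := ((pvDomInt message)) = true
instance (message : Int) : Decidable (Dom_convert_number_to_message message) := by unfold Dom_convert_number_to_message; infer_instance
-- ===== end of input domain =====

-- B replaces A's str-cast + zero-padding + 2-char chunking + conversion-table `.index` scan
-- by pure arithmetic: peel base-100 digits with divmod and map digit d to chr(64+d) (objective: simpler).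

-- ===== PORT A =====
-- the dict literal convert_table; its (single-char) strings are ported as lists of chars
def cnmTable : PySem.Dict (List Char) (List Char) :=
  PySem.Dict.ofList
  [(['A'], ['0','1']), (['B'], ['0','2']), (['C'], ['0','3']), (['D'], ['0','4']),
   (['E'], ['0','5']), (['F'], ['0','6']), (['G'], ['0','7']), (['H'], ['0','8']),
   (['I'], ['0','9']), (['J'], ['1','0']), (['K'], ['1','1']), (['L'], ['1','2']),
   (['M'], ['1','3']), (['N'], ['1','4']), (['O'], ['1','5']), (['P'], ['1','6']),
   (['Q'], ['1','7']), (['R'], ['1','8']), (['S'], ['1','9']), (['T'], ['2','0']),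
   (['U'], ['2','1']), (['V'], ['2','2']), (['W'], ['2','3']), (['X'], ['2','4']),
   (['Y'], ['2','5']), (['Z'], ['2','6'])]

def convert_number_to_message (message : Int) : String :=
  -- message = str(message)
  let ms0 := PySem.Int.toChars message
  -- if len(message) % 2 != 0: message = '0' + message
  let ms := if PySem.Int.mod (PySem.List.len ms0) 2 ≠ 0 then '0' :: ms0 else ms0
  -- key_list = list(convert_table.keys()); val_list = list(convert_table.values())
  let keyList := PySem.Dict.keys cnmTable
  let valList := PySem.Dict.values cnmTable
  -- chunks = [message[i:i+n] for i in range(0, len(message), n)]   (n = 2)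
  let chunks := (PySem.List.pyRange 0 (PySem.List.len ms) 2).map
      (fun i => PySem.List.slice ms (some i) (some (i + 2)))
  -- for val in chunks: position = val_list.index(val); string_message += key_list[position]
  let res := chunks.foldl
      (fun (acc : Option (List Char)) (val : List Char) =>
        acc.bind fun sm =>
          (PySem.List.index? valList val).bind fun position =>
            (PySem.List.pyGet? keyList (position : Int)).map fun key => sm ++ key)
      (some [])
  match res with
  | some sm => String.ofList sm
  | none => ""   -- Python raises ValueError here (excluded by Pre_)

-- ===== PORT B =====
-- the while-loop of Source B: n, d = divmod(n, 100); letters.append(chr(64 + d))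
def cnmAltGo (n : Int) (letters : List Char) : Option (List Char) :=
  if _h : 0 < n then
    let q := PySem.Int.floordiv n 100
    let d := PySem.Int.mod n 100
    if 1 ≤ d ∧ d ≤ 26 then
      cnmAltGo q (letters ++ [Char.ofNat ((64 + d).toNat)])
    else none   -- Python raises ValueError here (excluded by Pre_)
  else some letters
termination_by n.toNat
decreasing_by
  have hq : PySem.Int.floordiv n 100 = n / 100 := PySem.Int.floordiv_eq_ediv_of_pos (by omega)
  simp only [hq]
  omega

def convert_number_to_message_alt (message : Int) : String :=
  match cnmAltGo message [] with
  | some letters => String.ofList letters.reverse   -- ''.join(reversed(letters))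
  | none => ""   -- Python raises ValueError here (excluded by Pre_)

-- ===== PRECONDITION & SPEC =====
-- Pre_ holds exactly where A returns: A raises ValueError (int(..)/.index) unless message ≥ 1
-- and every base-100 digit of message — i.e. every 2-char chunk of the zero-padded decimal
-- string — lies in 1..26.
def Pre_convert_number_to_message (message : Int) : Prop :=
  1 ≤ message ∧ ∀ d ∈ Nat.digits 100 message.toNat, 1 ≤ d ∧ d ≤ 26
instance (message : Int) : Decidable (Pre_convert_number_to_message message) := by
  unfold Pre_convert_number_to_message; infer_instance

def pvWitness_convert_number_to_message : Int := 126

def Spec_convert_number_to_message (message : Int) (out : String) : Prop := out = convert_number_to_message_alt message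
instance (message : Int) (out : String) : Decidable (Spec_convert_number_to_message message out) := by unfold Spec_convert_number_to_message; infer_instance

-- ===== CLAIM (what is proved, stated in full; the proofs are below) =====
def Claim_equal_convert_number_to_message : Prop := ∀ (message : Int), Dom_convert_number_to_message message → Pre_convert_number_to_message message → Spec_convert_number_to_message message (convert_number_to_message message)

-- ===== LEMMAS AND PROOFS =====

-- the two characters of a base-100 digit, high decimal digit first
def cnmBlock (d : Nat) : List Char := [Nat.digitChar (d / 10), Nat.digitChar (d % 10)]

-- `Nat.toDigitsCore` with enough fuel produces the reversed decimal digit characters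
lemma cnmToDigitsCore_eq (fuel : Nat) : ∀ (n : Nat) (acc : List Char), n ≤ fuel → 0 < n →
    Nat.toDigitsCore 10 (fuel + 1) n acc
      = ((Nat.digits 10 n).map Nat.digitChar).reverse ++ acc := by
  induction fuel with
  | zero => intro n acc h1 h2; omega
  | succ f ih =>
    intro n acc h1 h2
    rw [Nat.toDigitsCore]
    rw [Nat.digits_def' (by norm_num : (1:Nat) < 10) h2]
    by_cases hq : n / 10 = 0
    · simp [hq, Nat.digits_zero]
    · rw [if_neg hq, ih (n / 10) _ (by omega) (by omega)]
      simp

lemma cnmToDigits_eq (n : Nat) (hpos : 0 < n) :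
    Nat.toDigits 10 n = ((Nat.digits 10 n).map Nat.digitChar).reverse := by
  have := cnmToDigitsCore_eq n n [] (le_refl n) hpos
  simpa [Nat.toDigits] using this

-- decimal digits of 100*q + d expressed through the digits of q
lemma cnmDigits10_group (q d : Nat) (hq : 0 < q) (hd : d < 100) :
    Nat.digits 10 (100 * q + d) = d % 10 :: d / 10 :: Nat.digits 10 q := by
  rw [Nat.digits_def' (by norm_num : (1:Nat) < 10) (by omega)]
  have e1 : (100 * q + d) % 10 = d % 10 := by omega
  have e2 : (100 * q + d) / 10 = 10 * q + d / 10 := by omega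
  rw [e1, e2, Nat.digits_def' (by norm_num : (1:Nat) < 10) (by omega)]
  have e3 : (10 * q + d / 10) % 10 = d / 10 := by omega
  have e4 : (10 * q + d / 10) / 10 = q := by omega
  rw [e3, e4]

-- the zero-padded decimal string is the concatenation of the 2-char blocks of the
-- base-100 digits, most significant first
lemma cnmPadded_eq (n : Nat) (hpos : 0 < n) :
    (if (Nat.toDigits 10 n).length % 2 ≠ 0 then '0' :: Nat.toDigits 10 n else Nat.toDigits 10 n)
      = ((Nat.digits 100 n).reverse).flatMap cnmBlock := by
  induction n using Nat.strong_induction_on with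
  | _ n ih =>
    by_cases hlt : n < 100
    · have hd100 : Nat.digits 100 n = [n] := by
        rw [Nat.digits_def' (by norm_num : (1:Nat) < 100) hpos]
        have : n / 100 = 0 := by omega
        simp [this]
        omega
      rw [hd100]
      by_cases h10 : n < 10
      · have hd10 : Nat.digits 10 n = [n] := by
          rw [Nat.digits_def' (by norm_num : (1:Nat) < 10) hpos]
          have : n / 10 = 0 := by omega
          simp [this]
          omega
        rw [cnmToDigits_eq n hpos, hd10]
        have e1 : n / 10 = 0 := by omega
        have e2 : n % 10 = n := by omega
        simp [cnmBlock, e1, e2, Nat.digitChar]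
      · have hd10 : Nat.digits 10 n = [n % 10, n / 10] := by
          rw [Nat.digits_def' (by norm_num : (1:Nat) < 10) hpos,
              Nat.digits_def' (by norm_num : (1:Nat) < 10) (by omega : 0 < n / 10)]
          have : n / 10 / 10 = 0 := by omega
          have e : n / 10 % 10 = n / 10 := by omega
          simp [this, e]
        rw [cnmToDigits_eq n hpos, hd10]
        simp [cnmBlock]
    · set q := n / 100 with hq
      set d := n % 100 with hd
      have hn : n = 100 * q + d := by omega
      have hqpos : 0 < q := by omega
      have hdlt : d < 100 := by omega
      have htd : Nat.toDigits 10 n = Nat.toDigits 10 q ++ cnmBlock d := by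
        rw [cnmToDigits_eq n hpos, cnmToDigits_eq q hqpos]
        rw [hn, cnmDigits10_group q d hqpos hdlt]
        simp [cnmBlock]
      have hd100 : Nat.digits 100 n = d :: Nat.digits 100 q := by
        rw [Nat.digits_def' (by norm_num : (1:Nat) < 100) hpos]
      rw [htd, hd100]
      have hlen : (Nat.toDigits 10 q ++ cnmBlock d).length % 2
          = (Nat.toDigits 10 q).length % 2 := by
        simp [cnmBlock]
      have ihq := ih q (by omega) hqpos
      by_cases hpar : (Nat.toDigits 10 q).length % 2 ≠ 0
      · rw [if_pos (by rw [hlen]; exact hpar)]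
        rw [if_pos hpar] at ihq
        simp only [List.reverse_cons, List.flatMap_append]
        rw [← ihq]
        simp [cnmBlock]
      · rw [if_neg (by rw [hlen]; exact hpar)]
        rw [if_neg hpar] at ihq
        simp only [List.reverse_cons, List.flatMap_append]
        rw [← ihq]
        simp [cnmBlock]

-- extracting the 2-char chunks recovers the blocks
lemma cnmChunks_eq : ∀ (R : List Nat),
    (List.range R.length).map (fun k => (List.drop (2 * k) (R.flatMap cnmBlock)).take 2)
      = R.map cnmBlock
  | [] => rfl
  | d :: R => by
    simp only [List.length_cons, List.range_succ_eq_map, List.map_cons, List.map_map,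
      List.flatMap_cons]
    congr 1
    rw [← cnmChunks_eq R]
    refine List.map_congr_left (fun j hj => ?_)
    simp only [Function.comp_apply, Nat.mul_succ, cnmBlock]
    have : 2 * j + 2 = (2 * j) + 1 + 1 := by omega
    rw [this]
    simp [List.drop_succ_cons]

-- val_list.index on the block of a valid digit
lemma cnmIndex_eq : ∀ d : Nat, d < 27 → 1 ≤ d →
    PySem.List.index? (PySem.Dict.values cnmTable) (cnmBlock d) = some (d - 1) := by decide

-- key_list[position] for a valid digit
lemma cnmKey_eq : ∀ d : Nat, d < 27 → 1 ≤ d →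
    PySem.List.pyGet? (PySem.Dict.keys cnmTable) ((d - 1 : Nat) : Int)
      = some [Char.ofNat (64 + d)] := by decide

-- total length of the blocks
lemma cnmBlocks_len : ∀ (R : List Nat), (R.flatMap cnmBlock).length = 2 * R.length
  | [] => rfl
  | d :: R => by simp [List.flatMap_cons, cnmBlocks_len R, cnmBlock]; omega

-- A's lookup loop over the blocks of valid digits
lemma cnmFoldA : ∀ (R : List Nat), (∀ d ∈ R, 1 ≤ d ∧ d ≤ 26) → ∀ (sm : List Char),
    List.foldl
      (fun (acc : Option (List Char)) (val : List Char) =>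
        acc.bind fun sm =>
          (PySem.List.index? (PySem.Dict.values cnmTable) val).bind fun position =>
            (PySem.List.pyGet? (PySem.Dict.keys cnmTable) (position : Int)).map fun key => sm ++ key)
      (some sm) (R.map cnmBlock)
      = some (sm ++ R.map (fun d => Char.ofNat (64 + d)))
  | [], _, sm => by simp
  | d :: R, h, sm => by
    have hd := h d (by simp)
    simp only [List.map_cons, List.foldl_cons, Option.bind_some]
    rw [cnmIndex_eq d (by omega) hd.1]
    simp only [Option.bind_some]
    rw [cnmKey_eq d (by omega) hd.1]
    simp only [Option.map_some]
    rw [cnmFoldA R (fun x hx => h x (by simp [hx])) (sm ++ [Char.ofNat (64 + d)])]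
    simp

-- B's loop over a positive number with valid base-100 digits
lemma cnmAltGo_eq (n : Nat) (hpos : 0 < n) (hdig : ∀ d ∈ Nat.digits 100 n, 1 ≤ d ∧ d ≤ 26) :
    ∀ (acc : List Char),
    cnmAltGo (n : Int) acc
      = some (acc ++ (Nat.digits 100 n).map (fun d => Char.ofNat (64 + d))) := by
  induction n using Nat.strong_induction_on with
  | _ n ih =>
    intro acc
    rw [cnmAltGo]
    rw [dif_pos (by exact_mod_cast hpos)]
    have hdrw : PySem.Int.mod (n : Int) 100 = ((n % 100 : Nat) : Int) := by
      exact_mod_cast PySem.Int.mod_natCast n 100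
    have hqrw : PySem.Int.floordiv (n : Int) 100 = ((n / 100 : Nat) : Int) := by
      exact_mod_cast PySem.Int.floordiv_natCast n 100
    have hdigs : Nat.digits 100 n = n % 100 :: Nat.digits 100 (n / 100) :=
      Nat.digits_def' (by norm_num : (1:Nat) < 100) hpos
    have hd : 1 ≤ n % 100 ∧ n % 100 ≤ 26 := hdig (n % 100) (by rw [hdigs]; simp)
    simp only [hdrw, hqrw]
    rw [if_pos (by constructor <;> [exact_mod_cast hd.1; exact_mod_cast hd.2])]
    have htn : ((64 + ((n % 100 : Nat) : Int)).toNat) = 64 + n % 100 := by omega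
    rw [htn]
    by_cases hq : n / 100 = 0
    · rw [hq]
      rw [cnmAltGo]
      rw [dif_neg (by norm_num)]
      rw [hdigs, hq]
      simp
    · rw [ih (n / 100) (by omega) (by omega)
        (fun x hx => hdig x (by rw [hdigs]; exact List.mem_cons_of_mem _ hx))]
      rw [hdigs]
      simp

-- ===== VERDICT (by name: the statement is the Claim_ definition above) =====
theorem convert_number_to_message_spec : Claim_equal_convert_number_to_message := by
  intro message _hdom hpre
  obtain ⟨hge, hdig⟩ := hpre
  unfold Spec_convert_number_to_message
  set m := message.toNat with hm
  have hmsg : message = (m : Int) := by omega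
  have hmpos : 0 < m := by omega
  set R := (Nat.digits 100 m).reverse with hR
  have hRdig : ∀ d ∈ R, 1 ≤ d ∧ d ≤ 26 := fun d hd => hdig d (List.mem_reverse.mp hd)
  -- evaluate A
  have hA : convert_number_to_message message
      = String.ofList (R.map (fun d => Char.ofNat (64 + d))) := by
    unfold convert_number_to_message
    have hchars : PySem.Int.toChars message = Nat.toDigits 10 m := by
      rw [hmsg]; simp [PySem.Int.toChars]
    rw [hchars]
    simp only []
    have hpadN := cnmPadded_eq m hmpos
    have hcond : (PySem.Int.mod (PySem.List.len (Nat.toDigits 10 m)) 2 ≠ 0)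
        ↔ ((Nat.toDigits 10 m).length % 2 ≠ 0) := by
      rw [PySem.List.len_eq]
      rw [show ((2:Int) = ((2:Nat):Int)) by norm_num]
      rw [PySem.Int.mod_natCast]
      exact_mod_cast Iff.rfl
    have hpad : (if PySem.Int.mod (PySem.List.len (Nat.toDigits 10 m)) 2 ≠ 0
        then '0' :: Nat.toDigits 10 m else Nat.toDigits 10 m) = R.flatMap cnmBlock := by
      rw [if_congr hcond rfl rfl]
      exact hpadN
    rw [hpad]
    have hRpos : 0 < R.length := by
      rw [hR]
      simp only [List.length_reverse, List.length_pos_iff, ne_eq,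
        Nat.digits_ne_nil_iff_ne_zero]
      omega
    have hlen : PySem.List.len (R.flatMap cnmBlock) = ((2 * R.length : Nat) : Int) := by
      rw [PySem.List.len_eq, cnmBlocks_len]
    rw [hlen]
    have hrange : PySem.List.pyRange 0 ((2 * R.length : Nat) : Int) 2
        = (List.range R.length).map (fun k => ((2 * k : Nat) : Int)) := by
      rw [PySem.List.pyRange_of_pos 0 _ (by norm_num)]
      rw [if_pos (by exact_mod_cast by omega : (0:Int) < ((2 * R.length : Nat) : Int))]
      have hcnt : ((((2 * R.length : Nat) : Int) - 0 + 2 - 1) / 2).toNat = R.length := by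
        omega
      rw [hcnt]
      refine List.map_congr_left (fun k hk => ?_)
      push_cast
      ring
    rw [hrange, List.map_map]
    have hmap : (List.range R.length).map
          ((fun i => PySem.List.slice (R.flatMap cnmBlock) (some i) (some (i + 2)))
            ∘ (fun k => ((2 * k : Nat) : Int)))
        = R.map cnmBlock := by
      rw [← cnmChunks_eq R]
      refine List.map_congr_left (fun k hk => ?_)
      simp only [Function.comp_apply]
      rw [show (((2 * k : Nat) : Int) + 2) = (((2 * k : Nat) : Int) + ((2:Nat) : Int)) by norm_num]
      rw [PySem.List.slice_natCast_add]
    rw [hmap]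
    rw [cnmFoldA R hRdig []]
    simp
  -- evaluate B
  have hB : convert_number_to_message_alt message
      = String.ofList (R.map (fun d => Char.ofNat (64 + d))) := by
    unfold convert_number_to_message_alt
    rw [hmsg, cnmAltGo_eq m hmpos hdig []]
    simp [hR, List.map_reverse]
  rw [hA, hB]
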